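-- pv_equiv track=rewrite | github.com/valttiuef/FastData-Py | src/frontend/tabs/data/import_preview_logic.py | _quick_guess_delimiter_from_line
-- ===== SOURCE A (Python) =====
-- from typing import Optional
--
-- def _quick_guess_delimiter_from_line(line: str) -> Optional[str]:
--     if not line:
--         return None
--     candidates = ["\t", ",", ";", "|", ":"]
--     counts = {candidate: line.count(candidate) for candidate in candidates}
--     if max(counts.values(), default=0) == 0:
--         return None
--     priority = {candidate: idx for idx, candidate in enumerate(candidates)}
--     return sorted(counts.items(), key=lambda item: (-item[1], priority[item[0]]))[0][0]
-- ===== SOURCE B (Python) =====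
-- from typing import Optional
--
-- def _quick_guess_delimiter_from_line(line: str) -> Optional[str]:
--     best_delim: Optional[str] = None
--     best_count = 0
--     for candidate in ["\t", ",", ";", "|", ":"]:
--         c = line.count(candidate)
--         if c > best_count:
--             best_delim = candidate
--             best_count = c
--     return best_delim
-- ===== Notes on version B (the rewrite author's own statement) =====
-- stated objective: simpler
-- what changed: Replaced the count dict, the priority dict and the full sort of the five (candidate, count) pairs by a single running-best loop over the candidates with a strict-greater update (first-wins ties), returning None when the best count stays 0.
import Mathlib
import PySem

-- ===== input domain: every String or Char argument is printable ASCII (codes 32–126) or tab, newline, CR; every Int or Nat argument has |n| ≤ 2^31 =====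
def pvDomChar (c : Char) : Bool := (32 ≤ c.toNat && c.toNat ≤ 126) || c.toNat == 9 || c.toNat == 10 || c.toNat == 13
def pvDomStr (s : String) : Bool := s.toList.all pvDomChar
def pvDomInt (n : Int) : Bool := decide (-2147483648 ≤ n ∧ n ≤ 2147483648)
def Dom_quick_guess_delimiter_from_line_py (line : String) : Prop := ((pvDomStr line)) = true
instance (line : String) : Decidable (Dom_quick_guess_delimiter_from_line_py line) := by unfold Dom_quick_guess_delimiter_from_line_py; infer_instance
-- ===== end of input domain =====

-- B replaces A's count dict, priority dict and full sort by a single running-best pass over the candidates (objective: simpler).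

-- ===== PORT A =====
def quick_guess_delimiter_from_line_py (line : String) : Option String :=
  if line == "" then none
  else
    let candidates : List String := ["\t", ",", ";", "|", ":"]
    let counts : PySem.Dict String Int :=
      candidates.foldl (fun d c => d.insert c (PySem.Str.count line c : Int)) PySem.Dict.empty
    if (PySem.List.max? counts.values (fun v => v)).getD 0 == 0 then none
    else
      let priority : PySem.Dict String Int :=
        (PySem.List.enumerate candidates).foldl (fun d p => d.insert p.2 p.1) PySem.Dict.empty
      -- priority[item[0]]: every key of counts is a candidate, so the Python lookup never raises (getD 0 is exact here)
      -- sorted(...)[0][0]: counts always has 5 items, so the sorted list is nonempty and the Python [0] never raises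
      match PySem.List.sorted2 counts.items (fun it => -it.2) (fun it => (priority.get? it.1).getD 0) with
      | [] => none
      | it :: _ => some it.1

-- ===== PORT B =====
def quick_guess_delimiter_from_line_py_alt (line : String) : Option String :=
  (["\t", ",", ";", "|", ":"].foldl
    (fun (best : Option String × Nat) cand =>
      let c := PySem.Str.count line cand
      if best.2 < c then (some cand, c) else best)
    (none, 0)).1

-- ===== PRECONDITION & SPEC =====
def Spec_quick_guess_delimiter_from_line_py (line : String) (out : Option String) : Prop := out = quick_guess_delimiter_from_line_py_alt line
instance (line : String) (out : Option String) : Decidable (Spec_quick_guess_delimiter_from_line_py line out) := by unfold Spec_quick_guess_delimiter_from_line_py; infer_instance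

-- ===== CLAIM (what is proved, stated in full; the proofs are below) =====
def Claim_equal_quick_guess_delimiter_from_line_py : Prop := ∀ (line : String), Dom_quick_guess_delimiter_from_line_py line → Spec_quick_guess_delimiter_from_line_py line (quick_guess_delimiter_from_line_py line)

-- ===== LEMMAS AND PROOFS =====

-- A's non-empty-line branch and B, as functions of the five candidate counts (definitionally
-- equal to the respective port bodies once the literal candidate list is folded through).
def pvA2 (a b c d e : Nat) : Option String :=
  if (PySem.List.max? [((a:Nat):Int),b,c,d,e] (fun v => v)).getD 0 == 0 then none
  else
    let priority : PySem.Dict String Int := PySem.Dict.mk [("\t",0),(",",1),(";",2),("|",3),(":",4)]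
    match PySem.List.sorted2 [(("\t":String),(a:Int)), (",",b), (";",c), ("|",d), (":",e)]
        (fun it => -it.2) (fun it => (priority.get? it.1).getD 0) with
    | [] => none
    | it :: _ => some it.1

def pvB2 (a b c d e : Nat) : Option String :=
  ([(("\t":String),a), (",",b), (";",c), ("|",d), (":",e)].foldl
    (fun (best : Option String × Nat) cand =>
      if best.2 < cand.2 then (some cand.1, cand.2) else best)
    (none, 0)).1

lemma pv_hmax (a b c d e : Nat) :
    (PySem.List.max? [((a:Nat):Int),b,c,d,e] (fun v => v)).getD 0 = 0 ↔
      (a = 0 ∧ b = 0 ∧ c = 0 ∧ d = 0 ∧ e = 0) := by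
  rw [PySem.List.max?_id_cons]
  simp only [List.foldl, Option.getD_some]
  omega

set_option maxHeartbeats 4000000 in
lemma pv_key (a b c d e : Nat) : pvA2 a b c d e = pvB2 a b c d e := by
  by_cases hz : (PySem.List.max? [((a:Nat):Int),b,c,d,e] (fun v => v)).getD 0 = 0
  · obtain ⟨rfl, rfl, rfl, rfl, rfl⟩ := (pv_hmax a b c d e).mp hz
    decide
  · have hnz := (pv_hmax a b c d e).not.mp hz
    unfold pvA2 pvB2
    rw [if_neg (by simpa using hz)]
    simp only [PySem.List.sorted2, PySem.List.insertBy, List.foldl, PySem.Dict.get?, List.find?,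
      Option.map, Option.getD, String.reduceBEq, reduceIte, Bool.false_eq_true, decide_eq_true_eq,
      Bool.or_eq_true, Bool.and_eq_true, Bool.not_eq_eq_eq_not, Bool.not_true,
      decide_eq_false_iff_not, not_lt, neg_lt_neg_iff, Nat.cast_lt, true_and,
      and_true, false_and, and_false, false_or, or_false, not_true, not_false_iff, Nat.reduceLT,
      lt_self_iff_false]
    repeat' (first
      | rfl
      | omega
      | (split_ifs <;>
          simp_all only [PySem.List.insertBy, List.foldl, PySem.Dict.get?, List.find?, Option.map,
            Option.getD, String.reduceBEq, reduceIte, Bool.false_eq_true, decide_eq_true_eq,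
            Bool.or_eq_true, Bool.and_eq_true, Bool.not_eq_eq_eq_not, Bool.not_true,
            decide_eq_false_iff_not, not_lt, neg_lt_neg_iff, Nat.cast_lt, true_or, or_true,
            true_and, and_true, false_and, and_false, false_or, or_false, not_true, not_false_iff,
            Nat.reduceLT, lt_self_iff_false])
      | (simp_all only [PySem.List.insertBy, List.foldl, PySem.Dict.get?, List.find?, Option.map,
            Option.getD, String.reduceBEq, reduceIte, Bool.false_eq_true, decide_eq_true_eq,
            Bool.or_eq_true, Bool.and_eq_true, Bool.not_eq_eq_eq_not, Bool.not_true,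
            decide_eq_false_iff_not, not_lt, neg_lt_neg_iff, Nat.cast_lt, true_or, or_true,
            true_and, and_true, false_and, and_false, false_or, or_false, not_true, not_false_iff,
            Nat.reduceLT, lt_self_iff_false]))

-- ===== VERDICT (by name: the statement is the Claim_ definition above) =====
theorem quick_guess_delimiter_from_line_py_spec : Claim_equal_quick_guess_delimiter_from_line_py := by
  intro line _
  unfold Spec_quick_guess_delimiter_from_line_py
  by_cases h : line = ""
  · subst h; decide
  · unfold quick_guess_delimiter_from_line_py
    rw [if_neg (by simpa using h)]
    exact pv_key (PySem.Str.count line "\t") (PySem.Str.count line ",")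
      (PySem.Str.count line ";") (PySem.Str.count line "|") (PySem.Str.count line ":")
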